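-- pv_equiv track=rewrite | github.com/ui-insight/MindRouter | stress.py | generate_user_specs
-- ===== SOURCE A (Python) =====
-- from typing import Any, Dict, List, Optional
--
-- def generate_user_specs(num_users: int) -> List[Dict[str, str]]:
--     """Generate user specs with role distribution: ~50% student, ~17% each for others."""
--     if num_users < 4:
--         # With fewer than 4, ensure at least one of each important role
--         roles = ["student", "staff", "faculty", "admin"][:num_users]
--     else:
--         # Allocate: 1 admin, 1 faculty, 1 staff, rest students
--         n_admin = max(1, round(num_users * 0.17))
--         n_faculty = max(1, round(num_users * 0.17))
--         n_staff = max(1, round(num_users * 0.17))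
--         n_student = num_users - n_admin - n_faculty - n_staff
--         n_student = max(1, n_student)
--
--         roles = (
--             ["student"] * n_student
--             + ["staff"] * n_staff
--             + ["faculty"] * n_faculty
--             + ["admin"] * n_admin
--         )
--
--     # Count per role for naming
--     role_counters: Dict[str, int] = {}
--     specs = []
--     for role in roles:
--         role_counters[role] = role_counters.get(role, 0) + 1
--         n = role_counters[role]
--         username = f"_stress_{role}_{n}"
--         specs.append({
--             "username": username,
--             "email": f"{username}@test.local",
--             "role": role,
--         })
--     return specs
-- ===== SOURCE B (Python) =====
-- from typing import Dict, List
--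
-- def generate_user_specs(num_users: int) -> List[Dict[str, str]]:
--     """Generate user specs with role distribution: ~50% student, ~17% each for others."""
--     if num_users < 4:
--         pairs = [(role, 1) for role in ["student", "staff", "faculty", "admin"][:num_users]]
--     else:
--         c = max(1, round(num_users * 0.17))
--         pairs = [
--             ("student", max(1, num_users - 3 * c)),
--             ("staff", c),
--             ("faculty", c),
--             ("admin", c),
--         ]
--     # preallocate the result and fill it in order
--     specs: List[Dict[str, str]] = [None] * sum(count for _, count in pairs)
--     k = 0
--     for role, count in pairs:
--         for i in range(1, count + 1):
--             username = f"_stress_{role}_{i}"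
--             specs[k] = {
--                 "username": username,
--                 "email": f"{username}@test.local",
--                 "role": role,
--             }
--             k += 1
--     return specs
-- ===== Notes on version B (the rewrite author's own statement) =====
-- stated objective: alternative
-- what changed: B drops A's flat roles list and role_counters dict: it builds an ordered list of (role, count) pairs (reusing the slice for num_users < 4), preallocates the result of the known total size, and fills it with a nested loop numbering each role 1..count directly.
import Mathlib
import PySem

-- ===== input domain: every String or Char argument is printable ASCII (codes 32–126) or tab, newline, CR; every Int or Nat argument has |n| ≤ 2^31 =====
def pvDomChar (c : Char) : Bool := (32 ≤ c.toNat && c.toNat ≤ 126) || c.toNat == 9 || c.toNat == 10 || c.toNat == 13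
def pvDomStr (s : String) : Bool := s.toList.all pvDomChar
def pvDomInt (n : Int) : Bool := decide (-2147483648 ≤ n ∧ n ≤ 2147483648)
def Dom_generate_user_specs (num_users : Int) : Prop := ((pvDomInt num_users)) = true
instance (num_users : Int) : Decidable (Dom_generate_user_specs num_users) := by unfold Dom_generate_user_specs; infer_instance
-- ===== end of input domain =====

-- B replaces A's flat roles list and role_counters dict by ordered (role, count) pairs with a
-- nested numbering loop over a preallocated result (objective: alternative).


-- ===== PORT A =====
-- round(n * 0.17) for n ≥ 0, exact IEEE-754 emulation: 0.17 is the double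
-- 6124895493223875 / 2^55; the product n * 0.17 is rounded to 53 significant bits
-- (ties to even), then Python's round() rounds the result to an integer (ties to even).
def pvRoundHalfEven (a b : Nat) : Nat :=
  let q := a / b
  let r := a % b
  if 2 * r < b then q
  else if b < 2 * r then q + 1
  else if q % 2 = 0 then q else q + 1

def pvRound017 (n : Int) : Int :=
  let v := n.toNat * 6124895493223875
  let k := Nat.log2 v + 1          -- bit length of v (v > 0 whenever used: n ≥ 4)
  let v' := if k ≤ 53 then v else pvRoundHalfEven v (2 ^ (k - 53)) * 2 ^ (k - 53)
  ((pvRoundHalfEven v' (2 ^ 55) : Nat) : Int)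

-- the spec dict {"username": u, "email": u@test.local, "role": role} for user number n
def stressSpec (role : String) (n : Int) : List (String × String) :=
  let u := "_stress_" ++ role ++ "_" ++ PySem.Int.toStr n
  [("username", u), ("email", u ++ "@test.local"), ("role", role)]

-- body of A's 'for role in roles' loop: state = (role_counters, specs)
def aStep (st : PySem.Dict String Int × List (List (String × String))) (role : String) :
    PySem.Dict String Int × List (List (String × String)) :=
  let n := st.1.getD role 0 + 1
  (st.1.insert role n, st.2 ++ [stressSpec role n])

def generate_user_specs (num_users : Int) : List (List (String × String)) :=
  let roles : List String :=
    if num_users < 4 then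
      PySem.List.slice ["student", "staff", "faculty", "admin"] none (some num_users)
    else
      let n_admin := max 1 (pvRound017 num_users)
      let n_faculty := max 1 (pvRound017 num_users)
      let n_staff := max 1 (pvRound017 num_users)
      let n_student := num_users - n_admin - n_faculty - n_staff
      let n_student := max 1 n_student
      PySem.List.pyRepeat ["student"] n_student ++ PySem.List.pyRepeat ["staff"] n_staff ++
        PySem.List.pyRepeat ["faculty"] n_faculty ++ PySem.List.pyRepeat ["admin"] n_admin
  (roles.foldl aStep (PySem.Dict.empty, [])).2

-- ===== PORT B =====
-- B preallocates specs = [None] * total and fills it left to right with index k;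
-- that sequential fill is ported exactly as constructing the list in order, pair by pair.
def generate_user_specs_alt (num_users : Int) : List (List (String × String)) :=
  let pairs : List (String × Int) :=
    if num_users < 4 then
      (PySem.List.slice ["student", "staff", "faculty", "admin"] none (some num_users)).map
        (fun role => (role, 1))
    else
      let c := max 1 (pvRound017 num_users)
      [("student", max 1 (num_users - 3 * c)), ("staff", c), ("faculty", c), ("admin", c)]
  pairs.foldl
    (fun specs rc =>
      specs ++ (PySem.List.pyRange 1 (rc.2 + 1) 1).map (fun i => stressSpec rc.1 i)) []

-- ===== PRECONDITION & SPEC =====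
def Spec_generate_user_specs (num_users : Int) (out : List (List (String × String))) : Prop := out = generate_user_specs_alt num_users
instance (num_users : Int) (out : List (List (String × String))) : Decidable (Spec_generate_user_specs num_users out) := by unfold Spec_generate_user_specs; infer_instance

-- ===== CLAIM (what is proved, stated in full; the proofs are below) =====
def Claim_equal_generate_user_specs : Prop := ∀ (num_users : Int), Dom_generate_user_specs num_users → Spec_generate_user_specs num_users (generate_user_specs num_users)

-- ===== LEMMAS AND PROOFS =====

-- A's counter loop over a block of k equal roles appends specs numbered m+1 .. m+k
-- (m = the role's current counter).
lemma aSpecs (r : String) (k : Nat) :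
    ∀ (st : PySem.Dict String Int × List (List (String × String))) (m : Int),
      st.1.getD r 0 = m →
      ((List.replicate k r).foldl aStep st).2
        = st.2 ++ (List.range k).map (fun i : Nat => stressSpec r (m + 1 + (i : Int))) := by
  induction k with
  | zero => intro st m _; simp
  | succ k ih =>
    intro st m hm
    rw [List.replicate_succ, List.foldl_cons]
    have step : aStep st r = (st.1.insert r (m + 1), st.2 ++ [stressSpec r (m + 1)]) := by
      simp [aStep, hm]
    rw [step, ih _ (m + 1) (PySem.Dict.getD_insert_self _ _ _ _)]
    rw [List.range_succ_eq_map, List.map_cons, List.map_map]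
    simp only [Nat.cast_zero, add_zero, List.append_assoc, List.singleton_append]
    congr 2
    apply List.map_congr_left
    intro i _
    simp only [Function.comp]
    congr 1
    push_cast
    ring

-- A's counter loop never touches the counter of any other role.
lemma aDict (r : String) (k : Nat) :
    ∀ (st : PySem.Dict String Int × List (List (String × String))) (r' : String), r' ≠ r →
      ((List.replicate k r).foldl aStep st).1.getD r' 0 = st.1.getD r' 0 := by
  induction k with
  | zero => intro st r' _; rfl
  | succ k ih =>
    intro st r' h
    rw [List.replicate_succ, List.foldl_cons, ih _ _ h]
    exact PySem.Dict.getD_insert_of_ne _ _ _ h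

-- A's whole loop on the four replicate blocks of the num_users >= 4 branch.
lemma fourBlocks (a b c d : Nat) :
    ((List.replicate a "student" ++ List.replicate b "staff" ++ List.replicate c "faculty"
        ++ List.replicate d "admin").foldl aStep (PySem.Dict.empty, [])).2
      = (List.range a).map (fun i : Nat => stressSpec "student" ((0 : Int) + 1 + (i : Int)))
        ++ ((List.range b).map (fun i : Nat => stressSpec "staff" ((0 : Int) + 1 + (i : Int)))
        ++ ((List.range c).map (fun i : Nat => stressSpec "faculty" ((0 : Int) + 1 + (i : Int)))
        ++ (List.range d).map (fun i : Nat => stressSpec "admin" ((0 : Int) + 1 + (i : Int))))) := by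
  simp only [List.foldl_append]
  rw [aSpecs "admin" d _ 0 (by
        rw [aDict "faculty" c _ _ (by decide), aDict "staff" b _ _ (by decide),
          aDict "student" a _ _ (by decide)]
        exact PySem.Dict.getD_empty _ _),
      aSpecs "faculty" c _ 0 (by
        rw [aDict "staff" b _ _ (by decide), aDict "student" a _ _ (by decide)]
        exact PySem.Dict.getD_empty _ _),
      aSpecs "staff" b _ 0 (by
        rw [aDict "student" a _ _ (by decide)]
        exact PySem.Dict.getD_empty _ _),
      aSpecs "student" a _ 0 (PySem.Dict.getD_empty _ _)]
  simp [List.append_assoc]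

-- A's counter loop over pairwise-distinct roles (the num_users < 4 branch) numbers every role 1.
lemma aStep_nodup (t : List String) :
    ∀ (d : PySem.Dict String Int) (acc : List (List (String × String))),
      t.Nodup → (∀ r ∈ t, d.getD r 0 = 0) →
      (t.foldl aStep (d, acc)).2 = acc ++ t.map (fun r => stressSpec r 1) := by
  induction t with
  | nil => intro d acc _ _; simp
  | cons r t ih =>
    intro d acc hnd h0
    rw [List.foldl_cons]
    have step : aStep (d, acc) r = (d.insert r 1, acc ++ [stressSpec r 1]) := by
      simp [aStep, h0 r List.mem_cons_self]
    rw [step, ih _ _ hnd.of_cons]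
    · simp
    · intro r' hr'
      have hne : r' ≠ r := by rintro rfl; exact (List.nodup_cons.mp hnd).1 hr'
      rw [PySem.Dict.getD_insert_of_ne _ _ _ hne]
      exact h0 r' (List.mem_cons_of_mem _ hr')

-- B's inner loop for one (role, count) pair, count = m >= 1, as a range map.
lemma pyRange_block (r : String) (m : Int) (_hm : 1 ≤ m) :
    (PySem.List.pyRange 1 (m + 1) 1).map (fun i => stressSpec r i)
      = (List.range m.toNat).map (fun i : Nat => stressSpec r ((0 : Int) + 1 + (i : Int))) := by
  rw [PySem.List.pyRange_one, List.map_map]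
  simp only [add_sub_cancel_right]
  apply List.map_congr_left
  intro i _
  simp only [Function.comp]
  norm_num

-- the num_users < 4 branch
lemma branch_small (n : Int) (h : n < 4) : generate_user_specs n = generate_user_specs_alt n := by
  unfold generate_user_specs generate_user_specs_alt
  simp only [if_pos h]

  set t := PySem.List.slice ["student", "staff", "faculty", "admin"] none (some n) with ht
  have hsl : t = (["student", "staff", "faculty", "admin"]).take (PySem.List.clampIdx 4 n) := by
    rw [ht]; simp [PySem.List.slice]
  have hnd : t.Nodup := by
    rw [hsl]
    exact (by decide : (["student", "staff", "faculty", "admin"] : List String).Nodup).sublist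
      (List.take_sublist _ _)
  rw [aStep_nodup t _ _ hnd (fun r _ => PySem.Dict.getD_empty r 0)]
  rw [PySem.List.foldl_append_eq_flatMap]
  simp only [List.nil_append, List.flatMap_map]
  have h1 : ∀ r : String,
      (PySem.List.pyRange 1 (1 + 1) 1).map (fun i => stressSpec r i) = [stressSpec r 1] := by
    intro r
    rw [PySem.List.pyRange_one_singleton]
    rfl
  simp only [h1]
  induction t with
  | nil => rfl
  | cons a t iht => simp_all

-- the num_users >= 4 branch
lemma branch_big (n : Int) (h : ¬ n < 4) : generate_user_specs n = generate_user_specs_alt n := by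
  unfold generate_user_specs generate_user_specs_alt
  simp only [if_neg h]

  set c := max 1 (pvRound017 n) with hc
  have hc1 : (1 : Int) ≤ c := le_max_left _ _
  set s := max 1 (n - c - c - c) with hs
  have hs' : s = max 1 (n - 3 * c) := by rw [hs]; ring_nf
  simp only [PySem.List.pyRepeat_singleton]
  rw [fourBlocks s.toNat c.toNat c.toNat c.toNat]
  simp only [List.foldl_cons, List.foldl_nil, List.nil_append]
  rw [pyRange_block "student" _ (hs' ▸ (le_max_left 1 (n - 3 * c))),
      pyRange_block "staff" c hc1, pyRange_block "faculty" c hc1, pyRange_block "admin" c hc1]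
  rw [hs']
  simp [List.append_assoc]

-- ===== VERDICT (by name: the statement is the Claim_ definition above) =====
theorem generate_user_specs_spec : Claim_equal_generate_user_specs := by
  intro n _
  show generate_user_specs n = generate_user_specs_alt n
  by_cases h : n < 4
  · exact branch_small n h
  · exact branch_big n h
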